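-- pv_equiv track=rewrite | github.com/Revilllo7/cryptography-classes | lab01/crypto_analysis.py | analyze_without_plaintext
-- ===== SOURCE A (Python) =====
-- import string
-- from math import gcd
--
-- def analyze_without_plaintext(encrypted_text, cipher_type):
--     alphabet = string.ascii_uppercase
--     possible_texts = []
--
--     encrypted_text = encrypted_text.upper()  # Ensure uppercase input
--
--     if cipher_type == 'caesar':
--         for shift in range(26):
--             decrypted = ''.join(
--                 alphabet[(alphabet.index(c) - shift) % 26] if c in alphabet else c
--                 for c in encrypted_text
--             )
--             possible_texts.append(f"Shift {shift}: {decrypted}")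
--
--     elif cipher_type == 'affine':
--         valid_multipliers = [m for m in range(1, 26, 2) if gcd(m, 26) == 1]
--
--         for multiplier in valid_multipliers:
--             try:
--                 inv_multiplier = pow(multiplier, -1, 26)
--                 for shift in range(26):
--                     decrypted = ''.join(
--                         alphabet[(inv_multiplier * ((alphabet.index(c) - shift) % 26)) % 26] if c in alphabet else c
--                         for c in encrypted_text
--                     )
--                     possible_texts.append(f"a={multiplier}, b={shift}: {decrypted}")
--             except ValueError:
--                 continue  # Skip invalid multipliers
--
--     return possible_texts
-- ===== SOURCE B (Python) =====
-- import string
--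
-- _A = string.ascii_uppercase
--
--
-- def _shift(chars, k):
--     # rotate every letter k places along the alphabet, leave other characters alone
--     return [_A[(ord(c) - 65 + k) % 26] if c in _A else c for c in chars]
--
--
-- def analyze_without_plaintext(encrypted_text, cipher_type):
--     chars = list(encrypted_text.upper())
--     results = []
--     if cipher_type == 'caesar':
--         cur = chars  # the shift-0 decryption is the ciphertext itself
--         for b in range(26):
--             results.append(f"Shift {b}: {''.join(cur)}")
--             cur = _shift(cur, -1)  # next candidate: every letter one step back
--     elif cipher_type == 'affine':
--         for a in range(1, 26, 2):
--             if a == 13: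
--                 continue
--             inv = pow(a, -1, 26)
--             cur = [_A[inv * (ord(c) - 65) % 26] if c in _A else c for c in chars]  # b = 0
--             for b in range(26):
--                 results.append(f"a={a}, b={b}: {''.join(cur)}")
--                 cur = _shift(cur, -inv)  # next b: rotate the previous candidate by -inv
--     return results
-- ===== Notes on version B (the rewrite author's own statement) =====
-- stated objective: alternative
-- what changed: B derives each candidate incrementally from the previous one: the shift-(b+1) plaintext is the shift-b candidate with every letter rotated one alphabet step (inv steps per b for affine, whose base b=0 text is computed once per multiplier), instead of recomputing every candidate from the ciphertext with per-letter alphabet.index arithmetic.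
import Mathlib
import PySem

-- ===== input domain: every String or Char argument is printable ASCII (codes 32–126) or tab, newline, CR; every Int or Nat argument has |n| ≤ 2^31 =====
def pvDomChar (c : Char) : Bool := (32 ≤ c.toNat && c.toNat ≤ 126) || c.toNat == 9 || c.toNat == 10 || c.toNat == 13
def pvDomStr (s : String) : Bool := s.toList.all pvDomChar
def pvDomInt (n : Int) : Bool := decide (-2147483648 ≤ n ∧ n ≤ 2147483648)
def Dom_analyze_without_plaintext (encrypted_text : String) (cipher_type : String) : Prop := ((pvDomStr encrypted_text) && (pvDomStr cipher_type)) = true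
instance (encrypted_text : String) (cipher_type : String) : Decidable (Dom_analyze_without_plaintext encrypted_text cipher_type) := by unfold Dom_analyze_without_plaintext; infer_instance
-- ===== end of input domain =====

-- B builds each candidate incrementally from the previous one (a constant letter rotation per
-- step) instead of recomputing every candidate from the ciphertext; alternative algorithm, same cost.

-- string.ascii_uppercase (shared constant of both sides)
def pvAlph : List Char :=
  ['A','B','C','D','E','F','G','H','I','J','K','L','M',
   'N','O','P','Q','R','S','T','U','V','W','X','Y','Z']

-- hand port of pow(m, -1, 26): first x in range(26) with m*x % 26 == 1.  Exact for every m
-- either program reaches (odd m ≠ 13, where Python's pow raises no ValueError).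
def pvInv26 (m : Int) : Int :=
  (((PySem.List.pyRange 0 26 1).find? (fun x => PySem.Int.mod (m * x) 26 == 1)).getD 0)

-- ===== PORT A =====
-- the conditional expression inside A's join: alphabet[(alphabet.index(c) - shift) % 26] if c in alphabet else c
def pvCharCaesarA (shift : Int) (c : Char) : Char :=
  if pvAlph.contains c then
    PySem.List.pyGetD pvAlph (PySem.Int.mod ((((PySem.List.index? pvAlph c).getD 0 : Nat) : Int) - shift) 26) c
  else c

-- alphabet[(inv_multiplier * ((alphabet.index(c) - shift) % 26)) % 26] if c in alphabet else c
def pvCharAffineA (inv shift : Int) (c : Char) : Char :=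
  if pvAlph.contains c then
    PySem.List.pyGetD pvAlph
      (PySem.Int.mod (inv * PySem.Int.mod ((((PySem.List.index? pvAlph c).getD 0 : Nat) : Int) - shift) 26) 26) c
  else c

-- ''.join of one-character strings over the text is ported as String.ofList of the mapped char list
def analyze_without_plaintext (encrypted_text : String) (cipher_type : String) : List String :=
  let text := PySem.Str.upper encrypted_text
  if cipher_type == "caesar" then
    (PySem.List.pyRange 0 26 1).foldl
      (fun acc shift =>
        acc ++ ["Shift " ++ PySem.Int.toStr shift ++ ": " ++
                  String.ofList (text.toList.map (pvCharCaesarA shift))]) []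
  else if cipher_type == "affine" then
    let valid_multipliers := (PySem.List.pyRange 1 26 2).filter (fun m => Int.gcd m 26 == 1)
    valid_multipliers.foldl
      (fun acc m =>
        let inv := pvInv26 m
        (PySem.List.pyRange 0 26 1).foldl
          (fun acc2 shift =>
            acc2 ++ ["a=" ++ PySem.Int.toStr m ++ ", b=" ++ PySem.Int.toStr shift ++ ": " ++
                       String.ofList (text.toList.map (pvCharAffineA inv shift))]) acc) []
  else []

-- ===== PORT B =====
-- _shift's per-character body: _A[(ord(c) - 65 + k) % 26] if c in _A else c
def pvShiftChar (k : Int) (c : Char) : Char :=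
  if pvAlph.contains c then
    PySem.List.pyGetD pvAlph (PySem.Int.mod (((c.toNat : Int)) - 65 + k) 26) c
  else c

-- _shift(chars, k)
def pvShift (k : Int) (cs : List Char) : List Char := cs.map (pvShiftChar k)

-- the affine b = 0 base candidate: _A[inv * (ord(c) - 65) % 26] if c in _A else c
def pvAffineBase (inv : Int) (c : Char) : Char :=
  if pvAlph.contains c then
    PySem.List.pyGetD pvAlph (PySem.Int.mod (inv * ((c.toNat : Int) - 65)) 26) c
  else c

def analyze_without_plaintext_alt (encrypted_text : String) (cipher_type : String) : List String :=
  let chars := (PySem.Str.upper encrypted_text).toList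
  if cipher_type == "caesar" then
    (((PySem.List.pyRange 0 26 1).foldl
        (fun (st : List String × List Char) b =>
          (st.1 ++ ["Shift " ++ PySem.Int.toStr b ++ ": " ++ String.ofList st.2],
           pvShift (-1) st.2))
        (([] : List String), chars))).1
  else if cipher_type == "affine" then
    (PySem.List.pyRange 1 26 2).foldl
      (fun results a =>
        if a == 13 then results
        else
          let inv := pvInv26 a
          (((PySem.List.pyRange 0 26 1).foldl
              (fun (st : List String × List Char) b =>
                (st.1 ++ ["a=" ++ PySem.Int.toStr a ++ ", b=" ++ PySem.Int.toStr b ++ ": " ++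
                            String.ofList st.2],
                 pvShift (-inv) st.2))
              (results, chars.map (pvAffineBase inv)))).1)
      []
  else []

-- ===== PRECONDITION & SPEC =====
def Spec_analyze_without_plaintext (encrypted_text : String) (cipher_type : String) (out : List String) : Prop := out = analyze_without_plaintext_alt encrypted_text cipher_type
instance (encrypted_text : String) (cipher_type : String) (out : List String) : Decidable (Spec_analyze_without_plaintext encrypted_text cipher_type out) := by unfold Spec_analyze_without_plaintext; infer_instance

-- ===== CLAIM (what is proved, stated in full; the proofs are below) =====
def Claim_equal_analyze_without_plaintext : Prop := ∀ (encrypted_text : String) (cipher_type : String), Dom_analyze_without_plaintext encrypted_text cipher_type → Spec_analyze_without_plaintext encrypted_text cipher_type (analyze_without_plaintext encrypted_text cipher_type)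

-- ===== LEMMAS AND PROOFS =====

-- a letter's first index in the alphabet is its code point minus 65
theorem pvIdx_of_mem (c : Char) (hc : c ∈ pvAlph) :
    (((PySem.List.index? pvAlph c).getD 0 : Nat) : Int) = (c.toNat : Int) - 65 := by
  fin_cases hc <;> decide

theorem pvAlph_fin :
    ∀ j : Fin 26, (pvAlph[(j : Nat)]'(by simp [pvAlph])).toNat = 65 + (j : Nat) := by
  decide

-- the character the table indexing produces: a letter whose code is 65 + the index
theorem pvGetD_alph (e : Int) (h0 : 0 ≤ e) (h1 : e < 26) (d : Char) :
    ((PySem.List.pyGetD pvAlph e d).toNat : Int) = 65 + e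
      ∧ PySem.List.pyGetD pvAlph e d ∈ pvAlph := by
  have hlen : e < (pvAlph.length : Int) := by
    rw [show pvAlph.length = 26 from rfl]; exact_mod_cast h1
  rw [PySem.List.pyGetD_eq_getElem pvAlph d h0 hlen]
  refine ⟨?_, List.getElem_mem _⟩
  have h5 := pvAlph_fin ⟨e.toNat, by omega⟩
  simp only [Fin.val_mk] at h5
  rw [h5]
  omega

theorem pvMod_bounds (x : Int) : 0 ≤ PySem.Int.mod x 26 ∧ PySem.Int.mod x 26 < 26 :=
  ⟨PySem.Int.mod_nonneg x (by norm_num), PySem.Int.mod_lt x (by norm_num)⟩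

-- an in-range pyGetD does not look at its default
theorem pvGetD_default {i : Int} (d d' : Char) (h0 : 0 ≤ i) (h1 : i < 26) :
    PySem.List.pyGetD pvAlph i d = PySem.List.pyGetD pvAlph i d' := by
  have hlen : i < (pvAlph.length : Int) := by
    rw [show pvAlph.length = 26 from rfl]; exact_mod_cast h1
  rw [PySem.List.pyGetD_eq_getElem pvAlph d h0 hlen,
      PySem.List.pyGetD_eq_getElem pvAlph d' h0 hlen]

-- congruence of mod 26 under multiplication
theorem pvMod_mul_cong (inv x y : Int) (h : PySem.Int.mod x 26 = PySem.Int.mod y 26) :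
    PySem.Int.mod (inv * x) 26 = PySem.Int.mod (inv * y) 26 := by
  simp only [PySem.Int.mod_eq_emod_of_pos (show (0:Int) < 26 by norm_num)] at *
  rw [Int.mul_emod, h, ← Int.mul_emod]

-- inv * ((i - b) % 26) % 26 = inv * (i - b) % 26
theorem pvMod_mul (inv x : Int) :
    PySem.Int.mod (inv * PySem.Int.mod x 26) 26 = PySem.Int.mod (inv * x) 26 := by
  apply pvMod_mul_cong
  simp only [PySem.Int.mod_eq_emod_of_pos (show (0:Int) < 26 by norm_num)]
  omega

-- ===== the chain invariant: folding a constant per-letter step produces all candidates =====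
theorem pvChain (g : Int → Char → Char) (stepc : Char → Char) (text : List Char)
    (hstep : ∀ b c, stepc (g b c) = g (b + 1) c) (lbl : Int → String) :
    ∀ (n : Nat) (b0 : Int) (acc : List String),
      ((PySem.List.pyRange b0 (b0 + (n : Int)) 1).foldl
        (fun (st : List String × List Char) b =>
          (st.1 ++ [lbl b ++ String.ofList st.2], st.2.map stepc))
        (acc, text.map (g b0))).1
      = acc ++ (PySem.List.pyRange b0 (b0 + (n : Int)) 1).map
          (fun b => lbl b ++ String.ofList (text.map (g b))) := by
  intro n
  induction n with
  | zero =>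
      intro b0 acc
      rw [show b0 + ((0 : Nat) : Int) = b0 by simp,
          PySem.List.pyRange_one_eq_nil (le_refl b0)]
      simp
  | succ m ih =>
      intro b0 acc
      have hlt : b0 < b0 + ((m + 1 : Nat) : Int) := by push_cast; omega
      rw [PySem.List.pyRange_one_cons hlt]
      simp only [List.foldl_cons, List.map_cons]
      have hshift : b0 + ((m + 1 : Nat) : Int) = (b0 + 1) + ((m : Nat) : Int) := by
        push_cast; ring
      rw [hshift]
      have hstate : (text.map (g b0)).map stepc = text.map (g (b0 + 1)) := by
        rw [List.map_map]
        exact List.map_congr_left (fun c _ => hstep b0 c)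
      rw [hstate, ih (b0 + 1)]
      simp

-- the chain over the concrete shift range 0..25
theorem pvChain26 (g : Int → Char → Char) (stepc : Char → Char) (text : List Char)
    (hstep : ∀ b c, stepc (g b c) = g (b + 1) c) (lbl : Int → String) (acc : List String) :
    ((PySem.List.pyRange 0 26 1).foldl
        (fun (st : List String × List Char) b =>
          (st.1 ++ [lbl b ++ String.ofList st.2], st.2.map stepc))
        (acc, text.map (g 0))).1
      = acc ++ (PySem.List.pyRange 0 26 1).map
          (fun b => lbl b ++ String.ofList (text.map (g b))) := by
  have h := pvChain g stepc text hstep lbl 26 0 acc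
  rw [show (0 : Int) + ((26 : Nat) : Int) = 26 by norm_num] at h
  exact h

-- skip-by-continue folding equals folding the filtered list
theorem pvFoldl_skip {β : Type} (h : β → Int → β) :
    ∀ (l : List Int) (init : β),
      l.foldl (fun acc a => if a == 13 then acc else h acc a) init
        = (l.filter (fun a => !(a == 13))).foldl h init := by
  intro l
  induction l with
  | nil => intro init; rfl
  | cons x t ih =>
      intro init
      simp only [List.foldl_cons, List.filter_cons]
      by_cases hx : x = (13 : Int)
      · have hb : (x == (13 : Int)) = true := by simp [hx]
        simp only [hb, if_true, Bool.not_true, Bool.false_eq_true, if_false]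
        exact ih init
      · have hb : (x == (13 : Int)) = false := by simp [hx]
        simp only [hb, Bool.false_eq_true, if_false, Bool.not_false, if_true, List.foldl_cons]
        exact ih (h init x)

-- the two branch predicates pick the same multipliers out of range(1, 26, 2)
theorem pvFilter_eq :
    (PySem.List.pyRange 1 26 2).filter (fun m => Int.gcd m 26 == 1)
      = (PySem.List.pyRange 1 26 2).filter (fun a => !(a == (13 : Int))) := by
  decide

-- shift 0 decrypts to the ciphertext itself
theorem pvCaesar_base (c : Char) : pvCharCaesarA 0 c = c := by
  by_cases hc : c ∈ pvAlph
  · fin_cases hc <;> decide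
  · simp only [pvCharCaesarA, List.contains_eq_mem, hc, decide_false, Bool.false_eq_true,
      if_false]

-- rotating a caesar candidate one step back gives the next shift's candidate
theorem pvCaesar_step (b : Int) (c : Char) :
    pvShiftChar (-1) (pvCharCaesarA b c) = pvCharCaesarA (b + 1) c := by
  by_cases hc : c ∈ pvAlph
  · have hidx := pvIdx_of_mem c hc
    simp only [pvCharCaesarA, List.contains_eq_mem, hc, decide_true, if_true, hidx]
    obtain ⟨hcode, hmem⟩ :=
      pvGetD_alph _ (pvMod_bounds ((c.toNat : Int) - 65 - b)).1
        (pvMod_bounds ((c.toNat : Int) - 65 - b)).2 c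
    simp only [pvShiftChar, List.contains_eq_mem, hmem, decide_true, if_true, hcode]
    have harith : PySem.Int.mod (65 + PySem.Int.mod ((c.toNat : Int) - 65 - b) 26 - 65 + -1) 26
        = PySem.Int.mod ((c.toNat : Int) - 65 - (b + 1)) 26 := by
      simp only [PySem.Int.mod_eq_emod_of_pos (show (0:Int) < 26 by norm_num)]
      omega
    rw [harith]
    exact pvGetD_default _ c (pvMod_bounds _).1 (pvMod_bounds _).2
  · simp only [pvCharCaesarA, pvShiftChar, List.contains_eq_mem, hc, decide_false,
      Bool.false_eq_true, if_false]

-- the b = 0 affine candidate equals A's affine decryption at shift 0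
theorem pvAffine_base (inv : Int) (c : Char) : pvAffineBase inv c = pvCharAffineA inv 0 c := by
  by_cases hc : c ∈ pvAlph
  · have hidx := pvIdx_of_mem c hc
    simp only [pvAffineBase, pvCharAffineA, List.contains_eq_mem, hc, decide_true, if_true,
      hidx, sub_zero, pvMod_mul]
  · simp only [pvAffineBase, pvCharAffineA, List.contains_eq_mem, hc, decide_false,
      Bool.false_eq_true, if_false]

-- rotating an affine candidate by -inv gives the next shift's candidate
theorem pvAffine_step (inv b : Int) (c : Char) :
    pvShiftChar (-inv) (pvCharAffineA inv b c) = pvCharAffineA inv (b + 1) c := by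
  by_cases hc : c ∈ pvAlph
  · have hidx := pvIdx_of_mem c hc
    simp only [pvCharAffineA, List.contains_eq_mem, hc, decide_true, if_true, hidx]
    obtain ⟨hcode, hmem⟩ :=
      pvGetD_alph (PySem.Int.mod (inv * PySem.Int.mod ((c.toNat : Int) - 65 - b) 26) 26)
        (pvMod_bounds _).1 (pvMod_bounds _).2 c
    simp only [pvShiftChar, List.contains_eq_mem, hmem, decide_true, if_true, hcode]
    have harith :
        PySem.Int.mod (65 + PySem.Int.mod (inv * PySem.Int.mod ((c.toNat : Int) - 65 - b) 26) 26 - 65 + -inv) 26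
          = PySem.Int.mod (inv * PySem.Int.mod ((c.toNat : Int) - 65 - (b + 1)) 26) 26 := by
      have h2 : PySem.Int.mod (65 + PySem.Int.mod (inv * PySem.Int.mod ((c.toNat : Int) - 65 - b) 26) 26 - 65 + -inv) 26
          = PySem.Int.mod (inv * PySem.Int.mod ((c.toNat : Int) - 65 - b) 26 - inv) 26 := by
        simp only [PySem.Int.mod_eq_emod_of_pos (show (0:Int) < 26 by norm_num)]
        omega
      have h3 : inv * PySem.Int.mod ((c.toNat : Int) - 65 - b) 26 - inv
          = inv * (PySem.Int.mod ((c.toNat : Int) - 65 - b) 26 - 1) := by ring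
      have h4 : PySem.Int.mod (inv * (PySem.Int.mod ((c.toNat : Int) - 65 - b) 26 - 1)) 26
          = PySem.Int.mod (inv * PySem.Int.mod ((c.toNat : Int) - 65 - (b + 1)) 26) 26 := by
        apply pvMod_mul_cong
        simp only [PySem.Int.mod_eq_emod_of_pos (show (0:Int) < 26 by norm_num)]
        omega
      rw [h2, h3, h4]
    rw [harith]
    exact pvGetD_default _ c (pvMod_bounds _).1 (pvMod_bounds _).2
  · simp only [pvCharAffineA, pvShiftChar, List.contains_eq_mem, hc, decide_false,
      Bool.false_eq_true, if_false]

-- ===== VERDICT (by name: the statement is the Claim_ definition above) =====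
theorem analyze_without_plaintext_spec : Claim_equal_analyze_without_plaintext := by
  intro encrypted_text cipher_type _
  unfold Spec_analyze_without_plaintext analyze_without_plaintext analyze_without_plaintext_alt
  by_cases hc : cipher_type == "caesar"
  · simp only [hc, if_true, PySem.List.foldl_append_singleton_eq_map, List.nil_append, pvShift]
    -- B: the ciphertext is the shift-0 candidate, then run the chain
    have hbase : (PySem.Str.upper encrypted_text).toList
        = (PySem.Str.upper encrypted_text).toList.map (pvCharCaesarA 0) := by
      conv_lhs => rw [← List.map_id ((PySem.Str.upper encrypted_text).toList)]
      exact List.map_congr_left (fun c _ => (pvCaesar_base c).symm)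
    rw [hbase,
        pvChain26 pvCharCaesarA (pvShiftChar (-1)) _ pvCaesar_step
          (fun b => "Shift " ++ PySem.Int.toStr b ++ ": ") []]
    simp
    intro a _ _
    congr 1
    refine List.map_congr_left fun c _ => ?_
    simp [Function.comp, pvCaesar_base]
  · simp only [hc, Bool.false_eq_true, if_false]
    by_cases ha : cipher_type == "affine"
    · simp only [ha, if_true, pvShift]
      -- A side: foldl of appends → flatMap over the gcd-filtered multipliers
      have hinnerA : (fun (acc : List String) (m : Int) =>
            (PySem.List.pyRange 0 26 1).foldl
              (fun acc2 shift =>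
                acc2 ++ ["a=" ++ PySem.Int.toStr m ++ ", b=" ++ PySem.Int.toStr shift ++ ": " ++
                  String.ofList ((PySem.Str.upper encrypted_text).toList.map (pvCharAffineA (pvInv26 m) shift))]) acc)
          = (fun acc m => acc ++ (PySem.List.pyRange 0 26 1).map
              (fun shift => "a=" ++ PySem.Int.toStr m ++ ", b=" ++ PySem.Int.toStr shift ++ ": " ++
                  String.ofList ((PySem.Str.upper encrypted_text).toList.map (pvCharAffineA (pvInv26 m) shift)))) :=
        funext fun acc => funext fun m => PySem.List.foldl_append_singleton_eq_map _ _ acc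
      rw [hinnerA, PySem.List.foldl_append_eq_flatMap, List.nil_append, pvFilter_eq]
      -- B side: drop the continue, then run the chain per multiplier
      rw [pvFoldl_skip]
      have hinnerB : (fun (results : List String) (a : Int) =>
            (((PySem.List.pyRange 0 26 1).foldl
                (fun (st : List String × List Char) b =>
                  (st.1 ++ ["a=" ++ PySem.Int.toStr a ++ ", b=" ++ PySem.Int.toStr b ++ ": " ++
                              String.ofList st.2],
                   st.2.map (pvShiftChar (-(pvInv26 a)))))
                (results, (PySem.Str.upper encrypted_text).toList.map (pvAffineBase (pvInv26 a))))).1)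
          = (fun results a => results ++ (PySem.List.pyRange 0 26 1).map
              (fun b => "a=" ++ PySem.Int.toStr a ++ ", b=" ++ PySem.Int.toStr b ++ ": " ++
                  String.ofList ((PySem.Str.upper encrypted_text).toList.map (pvCharAffineA (pvInv26 a) b)))) := by
        funext results a
        have hbase : (PySem.Str.upper encrypted_text).toList.map (pvAffineBase (pvInv26 a))
            = (PySem.Str.upper encrypted_text).toList.map (pvCharAffineA (pvInv26 a) 0) :=
          List.map_congr_left (fun c _ => pvAffine_base _ c)
        rw [hbase,
            pvChain26 (pvCharAffineA (pvInv26 a)) (pvShiftChar (-(pvInv26 a))) _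
              (pvAffine_step (pvInv26 a))
              (fun b => "a=" ++ PySem.Int.toStr a ++ ", b=" ++ PySem.Int.toStr b ++ ": ") results]
      rw [hinnerB, PySem.List.foldl_append_eq_flatMap, List.nil_append]
    · simp [ha]
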